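-- pv_equiv track=rewrite | github.com/terenceang/TN9K-DVI_HDMI | analyze_waveform.py | calculate_bch_ecc
-- ===== SOURCE A (Python) =====
-- def calculate_bch_ecc(hb0: int, hb1: int, hb2: int) -> int:
--     """Calculate BCH ECC for HDMI packet header
--
--     HDMI uses BCH(31,24) code with generator polynomial: G(x) = x^7 + x^3 + x^2 + 1
--     The ECC protects the 24-bit header (HB0, HB1, HB2)
--     Returns: 7-bit ECC (MSB is always 0 per HDMI spec, so returns 8-bit with MSB=0)
--     """
--     # Combine header bytes into 24-bit value {HB0, HB1, HB2}
--     data = (hb0 << 16) | (hb1 << 8) | hb2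
--
--     # BCH(31,24) generator polynomial: G(x) = x^7 + x^3 + x^2 + 1 (0x8D with implied x^7)
--     poly = 0x8D  # Represents: x^7 + x^3 + x^2 + 1
--     degree = 7
--
--     # LFSR-based BCH encoder
--     lfsr = 0
--
--     # Process 24 data bits (MSB first)
--     for i in range(23, -1, -1):
--         bit = (data >> i) & 1
--         feedback = bit ^ ((lfsr >> (degree - 1)) & 1)
--
--         # Shift LFSR
--         lfsr = (lfsr << 1) & ((1 << degree) - 1)
--
--         # Apply polynomial taps (x^3, x^2, x^0)
--         if feedback:
--             lfsr ^= 0x0D  # Bits 3, 2, 0 (0b00001101)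
--
--     # HDMI ECC format: MSB=0, bits 6:0 = BCH parity
--     return lfsr & 0x7F
-- ===== SOURCE B (Python) =====
-- # BCH(31,24) ECC via precomputed per-byte lookup tables: the code is GF(2)-linear,
-- # so the parity is the XOR of one table entry per header byte -- no bit loop at all.
--
-- _T0 = [0, 117, 103, 18, 67, 54, 36, 81, 11, 126, 108, 25, 72, 61, 47, 90, 22, 99, 113, 4, 85, 32, 50, 71, 29, 104, 122, 15, 94, 43, 57, 76, 44, 89, 75, 62, 111, 26, 8, 125, 39, 82, 64, 53, 100, 17, 3, 118, 58, 79, 93, 40, 121, 12, 30, 107, 49, 68, 86, 35, 114, 7, 21, 96, 88, 45, 63, 74, 27, 110, 124, 9, 83, 38, 52, 65, 16, 101, 119, 2, 78, 59, 41, 92, 13, 120, 106, 31, 69, 48, 34, 87, 6, 115, 97, 20, 116, 1, 19, 102, 55, 66, 80, 37, 127, 10, 24, 109, 60, 73, 91, 46, 98, 23, 5, 112, 33, 84, 70, 51, 105, 28, 14, 123, 42, 95, 77, 56, 61, 72, 90, 47, 126, 11, 25, 108, 54, 67, 81, 36, 117, 0, 18, 103, 43, 94, 76, 57, 104, 29,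 15, 122, 32, 85, 71, 50, 99, 22, 4, 113, 17, 100, 118, 3, 82, 39, 53, 64, 26, 111, 125, 8, 89, 44, 62, 75, 7, 114, 96, 21, 68, 49, 35, 86, 12, 121, 107, 30, 79, 58, 40, 93, 101, 16, 2, 119, 38, 83, 65, 52, 110, 27, 9, 124, 45, 88, 74, 63, 115, 6, 20, 97, 48, 69, 87, 34, 120, 13, 31, 106, 59, 78, 92, 41, 73, 60, 46, 91, 10, 127, 109, 24, 66, 55, 37, 80, 1, 116, 102, 19, 95, 42, 56, 77, 28, 105, 123, 14, 84, 33, 51, 70, 23, 98, 112, 5]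
--
-- _T1 = [0, 47, 94, 113, 49, 30, 111, 64, 98, 77, 60, 19, 83, 124, 13, 34, 73, 102, 23, 56, 120, 87, 38, 9, 43, 4, 117, 90, 26, 53, 68, 107, 31, 48, 65, 110, 46, 1, 112, 95, 125, 82, 35, 12, 76, 99, 18, 61, 86, 121, 8, 39, 103, 72, 57, 22, 52, 27, 106, 69, 5, 42, 91, 116, 62, 17, 96, 79, 15, 32, 81, 126, 92, 115, 2, 45, 109, 66, 51, 28, 119, 88, 41, 6, 70, 105, 24, 55, 21, 58, 75, 100, 36, 11, 122, 85, 33, 14, 127, 80, 16, 63, 78, 97, 67, 108, 29, 50, 114, 93, 44, 3, 104, 71, 54, 25, 89, 118, 7, 40, 10, 37, 84, 123, 59, 20, 101, 74, 124, 83, 34, 13, 77, 98, 19, 60, 30, 49, 64, 111, 47, 0, 113, 94, 53, 26, 107, 68, 4, 43, 90, 117, 87, 120, 9, 38, 102, 73, 56, 23, 99, 76, 61, 18, 82, 125, 12, 35, 1, 46, 95, 112, 48, 31, 110, 65, 42, 5, 116, 91, 27, 52, 69, 106, 72, 103, 22, 57, 121, 86, 39, 8, 66, 109, 28, 51, 115,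 92, 45, 2, 32, 15, 126, 81, 17, 62, 79, 96, 11, 36, 85, 122, 58, 21, 100, 75, 105, 70, 55, 24, 88, 119, 6, 41, 93, 114, 3, 44, 108, 67, 50, 29, 63, 16, 97, 78, 14, 33, 80, 127, 20, 59, 74, 101, 37, 10, 123, 84, 118, 89, 40, 7, 71, 104, 25, 54]
--
-- _T2 = [0, 13, 26, 23, 52, 57, 46, 35, 104, 101, 114, 127, 92, 81, 70, 75, 93, 80, 71, 74, 105, 100, 115, 126, 53, 56, 47, 34, 1, 12, 27, 22, 55, 58, 45, 32, 3, 14, 25, 20, 95, 82, 69, 72, 107, 102, 113, 124, 106, 103, 112, 125, 94, 83, 68, 73, 2, 15, 24, 21, 54, 59, 44, 33, 110, 99, 116, 121, 90, 87, 64, 77, 6, 11, 28, 17, 50, 63, 40, 37, 51, 62, 41, 36, 7, 10, 29, 16, 91, 86, 65, 76, 111, 98, 117, 120, 89, 84, 67, 78, 109, 96, 119, 122, 49, 60, 43, 38, 5, 8, 31, 18, 4, 9, 30, 19, 48, 61, 42, 39, 108, 97, 118, 123, 88, 85, 66, 79, 81, 92, 75, 70, 101, 104, 127, 114, 57, 52,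 35, 46, 13, 0, 23, 26, 12, 1, 22, 27, 56, 53, 34, 47, 100, 105, 126, 115, 80, 93, 74, 71, 102, 107, 124, 113, 82, 95, 72, 69, 14, 3, 20, 25, 58, 55, 32, 45, 59, 54, 33, 44, 15, 2, 21, 24, 83, 94, 73, 68, 103, 106, 125, 112, 63, 50, 37, 40, 11, 6, 17, 28, 87, 90, 77, 64, 99, 110, 121, 116, 98, 111, 120, 117, 86, 91, 76, 65, 10, 7, 16, 29, 62, 51, 36, 41, 8, 5, 18, 31, 60, 49, 38, 43, 96, 109, 122, 119, 84, 89, 78, 67, 85, 88, 79, 66, 97, 108, 123, 118, 61, 48, 39, 42, 9, 4, 19, 30]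
--
--
-- def calculate_bch_ecc(hb0: int, hb1: int, hb2: int) -> int:
--     """Calculate BCH ECC for HDMI packet header (table-driven)."""
--     data = ((hb0 << 16) | (hb1 << 8) | hb2) & 0xFFFFFF
--     return _T0[(data >> 16) & 0xFF] ^ _T1[(data >> 8) & 0xFF] ^ _T2[data & 0xFF]
-- ===== Notes on version B (the rewrite author's own statement) =====
-- stated objective: faster
-- what changed: Replaced the 24-iteration bit-serial LFSR with three precomputed 256-entry per-byte lookup tables: the ECC is the XOR of one table entry per header byte (GF(2) linearity), so B does no loop at all.
import Mathlib
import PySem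

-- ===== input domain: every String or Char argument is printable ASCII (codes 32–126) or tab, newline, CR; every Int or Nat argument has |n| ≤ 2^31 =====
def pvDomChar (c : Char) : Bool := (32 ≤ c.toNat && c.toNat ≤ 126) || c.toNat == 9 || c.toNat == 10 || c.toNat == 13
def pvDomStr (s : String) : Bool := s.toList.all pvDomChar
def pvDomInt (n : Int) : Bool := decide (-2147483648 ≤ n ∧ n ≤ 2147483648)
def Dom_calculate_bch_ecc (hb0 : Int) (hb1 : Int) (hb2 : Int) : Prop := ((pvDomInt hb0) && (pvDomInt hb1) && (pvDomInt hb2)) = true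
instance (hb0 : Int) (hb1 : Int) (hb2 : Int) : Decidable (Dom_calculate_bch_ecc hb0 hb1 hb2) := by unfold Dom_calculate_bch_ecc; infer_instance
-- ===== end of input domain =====

-- ===== PORT A =====
-- B replaces A's 24-step bit-serial LFSR by three precomputed 256-entry per-byte
-- lookup tables (the ECC is GF(2)-linear), XOR-combining one entry per header byte.
-- A's loop body, written as a helper; shift counts are Nat (the Python shifts are
-- by the nonnegative amounts i = 23..0, degree-1 = 6 and 1)
def pvLoopBody (data : Int) (lfsr : Int) (i : Int) : Int :=
  let bit := PySem.Int.band (data >>> i.toNat) 1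
  let feedback := PySem.Int.bxor bit (PySem.Int.band (lfsr >>> (7 - 1 : Nat)) 1)
  let lfsr := PySem.Int.band (lfsr <<< (1 : Nat)) ((1 <<< (7 : Nat)) - 1)
  if feedback ≠ 0 then PySem.Int.bxor lfsr 0x0D else lfsr

def calculate_bch_ecc (hb0 : Int) (hb1 : Int) (hb2 : Int) : Int :=
  let data := PySem.Int.bor (PySem.Int.bor (hb0 <<< 16) (hb1 <<< 8)) hb2
  let lfsr := (PySem.List.pyRange 23 (-1) (-1)).foldl (pvLoopBody data) 0
  PySem.Int.band lfsr 0x7F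

-- ===== PORT B =====
def pvT0 : List Int := [0, 117, 103, 18, 67, 54, 36, 81, 11, 126, 108, 25, 72, 61, 47, 90, 22, 99, 113, 4, 85, 32, 50, 71, 29, 104, 122, 15, 94, 43, 57, 76, 44, 89, 75, 62, 111, 26, 8, 125, 39, 82, 64, 53, 100, 17, 3, 118, 58, 79, 93, 40, 121, 12, 30, 107, 49, 68, 86, 35, 114, 7, 21, 96, 88, 45, 63, 74, 27, 110, 124, 9, 83, 38, 52, 65, 16, 101, 119, 2, 78, 59, 41, 92, 13, 120, 106, 31, 69, 48, 34, 87, 6, 115, 97, 20, 116, 1, 19, 102, 55, 66, 80, 37, 127, 10, 24, 109, 60, 73, 91, 46, 98, 23, 5, 112, 33, 84, 70, 51, 105, 28, 14, 123, 42, 95, 77, 56, 61, 72, 90, 47, 126, 11, 25, 108, 54, 67, 81, 36, 117, 0, 18, 103, 43, 94, 76, 57, 104, 29, 15, 122, 32, 85, 71, 50, 99, 22, 4, 113, 17, 100, 118, 3, 82, 39, 53, 64, 26, 111, 125, 8, 89, 44, 62, 75, 7, 114, 96, 21, 68, 49, 35, 86, 12, 121, 107, 30, 79, 58, 40, 93,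 101, 16, 2, 119, 38, 83, 65, 52, 110, 27, 9, 124, 45, 88, 74, 63, 115, 6, 20, 97, 48, 69, 87, 34, 120, 13, 31, 106, 59, 78, 92, 41, 73, 60, 46, 91, 10, 127, 109, 24, 66, 55, 37, 80, 1, 116, 102, 19, 95, 42, 56, 77, 28, 105, 123, 14, 84, 33, 51, 70, 23, 98, 112, 5]

def pvT1 : List Int := [0, 47, 94, 113, 49, 30, 111, 64, 98, 77, 60, 19, 83, 124, 13, 34, 73, 102, 23, 56, 120, 87, 38, 9, 43, 4, 117, 90, 26, 53, 68, 107, 31, 48, 65, 110, 46, 1, 112, 95, 125, 82, 35, 12, 76, 99, 18, 61, 86, 121, 8, 39, 103, 72, 57, 22, 52, 27, 106, 69, 5, 42, 91, 116, 62, 17, 96, 79, 15, 32, 81, 126, 92, 115, 2, 45, 109, 66, 51, 28, 119, 88, 41, 6, 70, 105, 24, 55, 21, 58, 75, 100, 36, 11, 122, 85, 33, 14, 127, 80, 16, 63, 78, 97, 67, 108, 29, 50, 114, 93, 44, 3, 104, 71, 54, 25, 89, 118, 7, 40, 10, 37, 84, 123, 59, 20, 101, 74, 124, 83, 34, 13,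 77, 98, 19, 60, 30, 49, 64, 111, 47, 0, 113, 94, 53, 26, 107, 68, 4, 43, 90, 117, 87, 120, 9, 38, 102, 73, 56, 23, 99, 76, 61, 18, 82, 125, 12, 35, 1, 46, 95, 112, 48, 31, 110, 65, 42, 5, 116, 91, 27, 52, 69, 106, 72, 103, 22, 57, 121, 86, 39, 8, 66, 109, 28, 51, 115, 92, 45, 2, 32, 15, 126, 81, 17, 62, 79, 96, 11, 36, 85, 122, 58, 21, 100, 75, 105, 70, 55, 24, 88, 119, 6, 41, 93, 114, 3, 44, 108, 67, 50, 29, 63, 16, 97, 78, 14, 33, 80, 127, 20, 59, 74, 101, 37, 10, 123, 84, 118, 89, 40, 7, 71, 104, 25, 54]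

def pvT2 : List Int := [0, 13, 26, 23, 52, 57, 46, 35, 104, 101, 114, 127, 92, 81, 70, 75, 93, 80, 71, 74, 105, 100, 115, 126, 53, 56, 47, 34, 1, 12, 27, 22, 55, 58, 45, 32, 3, 14, 25, 20, 95, 82, 69, 72, 107, 102, 113, 124, 106, 103, 112, 125, 94, 83, 68, 73, 2, 15, 24, 21, 54, 59, 44, 33, 110, 99, 116, 121, 90, 87, 64, 77, 6, 11, 28, 17, 50, 63, 40, 37, 51, 62, 41, 36, 7, 10, 29, 16, 91, 86, 65, 76, 111, 98, 117, 120, 89, 84, 67, 78, 109, 96, 119, 122, 49, 60, 43, 38, 5, 8, 31, 18, 4, 9, 30, 19, 48, 61, 42, 39, 108, 97, 118, 123, 88, 85, 66, 79, 81, 92, 75, 70, 101, 104, 127, 114, 57, 52, 35, 46, 13, 0, 23, 26, 12, 1, 22, 27, 56, 53, 34, 47, 100, 105, 126, 115, 80, 93, 74, 71, 102, 107, 124, 113, 82, 95, 72, 69, 14, 3, 20, 25, 58, 55, 32, 45, 59, 54, 33, 44, 15, 2, 21, 24, 83, 94, 73, 68, 103, 106, 125, 112, 63, 50, 37, 40,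 11, 6, 17, 28, 87, 90, 77, 64, 99, 110, 121, 116, 98, 111, 120, 117, 86, 91, 76, 65, 10, 7, 16, 29, 62, 51, 36, 41, 8, 5, 18, 31, 60, 49, 38, 43, 96, 109, 122, 119, 84, 89, 78, 67, 85, 88, 79, 66, 97, 108, 123, 118, 61, 48, 39, 42, 9, 4, 19, 30]

def calculate_bch_ecc_alt (hb0 : Int) (hb1 : Int) (hb2 : Int) : Int :=
  let data := PySem.Int.band (PySem.Int.bor (PySem.Int.bor (hb0 <<< 16) (hb1 <<< 8)) hb2) 0xFFFFFF
  PySem.Int.bxor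
    (PySem.Int.bxor
      (PySem.List.pyGetD pvT0 (PySem.Int.band (data >>> (16 : Nat)) 0xFF) 0)
      (PySem.List.pyGetD pvT1 (PySem.Int.band (data >>> (8 : Nat)) 0xFF) 0))
    (PySem.List.pyGetD pvT2 (PySem.Int.band data 0xFF) 0)

-- ===== PRECONDITION & SPEC =====
def Spec_calculate_bch_ecc (hb0 : Int) (hb1 : Int) (hb2 : Int) (out : Int) : Prop := out = calculate_bch_ecc_alt hb0 hb1 hb2
instance (hb0 : Int) (hb1 : Int) (hb2 : Int) (out : Int) : Decidable (Spec_calculate_bch_ecc hb0 hb1 hb2 out) := by unfold Spec_calculate_bch_ecc; infer_instance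

-- ===== CLAIM (what is proved, stated in full; the proofs are below) =====
def Claim_equal_calculate_bch_ecc : Prop := ∀ (hb0 : Int) (hb1 : Int) (hb2 : Int), Dom_calculate_bch_ecc hb0 hb1 hb2 → Spec_calculate_bch_ecc hb0 hb1 hb2 (calculate_bch_ecc hb0 hb1 hb2)

-- ===== LEMMAS AND PROOFS =====

-- Nat-level LFSR step and 8-bit (one byte) run, mirroring A's loop body
def pvStep (l b : Nat) : Nat :=
  let fb := b ^^^ ((l >>> 6) &&& 1)
  let l' := (l <<< 1) &&& 127
  if fb ≠ 0 then l' ^^^ 13 else l'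

def pvRun8 (l b : Nat) : Nat :=
  pvStep (pvStep (pvStep (pvStep (pvStep (pvStep (pvStep (pvStep l ((b >>> 7) &&& 1)) ((b >>> 6) &&& 1)) ((b >>> 5) &&& 1)) ((b >>> 4) &&& 1)) ((b >>> 3) &&& 1)) ((b >>> 2) &&& 1)) ((b >>> 1) &&& 1)) (b &&& 1)

-- Nat views of B's tables
def pvNT0 : List Nat := [0, 117, 103, 18, 67, 54, 36, 81, 11, 126, 108, 25, 72, 61, 47, 90, 22, 99, 113, 4, 85, 32, 50, 71, 29, 104, 122, 15, 94, 43, 57, 76, 44, 89, 75, 62, 111, 26, 8, 125, 39, 82, 64, 53, 100, 17, 3, 118, 58, 79, 93, 40, 121, 12, 30, 107, 49, 68, 86, 35, 114, 7, 21, 96, 88, 45, 63, 74, 27, 110, 124, 9, 83, 38, 52, 65, 16, 101, 119, 2, 78, 59, 41, 92, 13, 120, 106, 31, 69, 48, 34, 87, 6, 115, 97, 20, 116, 1, 19, 102, 55, 66, 80, 37, 127, 10, 24, 109, 60, 73, 91, 46, 98, 23, 5, 112, 33, 84, 70, 51, 105, 28, 14, 123, 42, 95, 77, 56, 61, 72,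 90, 47, 126, 11, 25, 108, 54, 67, 81, 36, 117, 0, 18, 103, 43, 94, 76, 57, 104, 29, 15, 122, 32, 85, 71, 50, 99, 22, 4, 113, 17, 100, 118, 3, 82, 39, 53, 64, 26, 111, 125, 8, 89, 44, 62, 75, 7, 114, 96, 21, 68, 49, 35, 86, 12, 121, 107, 30, 79, 58, 40, 93, 101, 16, 2, 119, 38, 83, 65, 52, 110, 27, 9, 124, 45, 88, 74, 63, 115, 6, 20, 97, 48, 69, 87, 34, 120, 13, 31, 106, 59, 78, 92, 41, 73, 60, 46, 91, 10, 127, 109, 24, 66, 55, 37, 80, 1, 116, 102, 19, 95, 42, 56, 77, 28, 105, 123, 14, 84, 33, 51, 70, 23, 98, 112, 5]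
def pvNT1 : List Nat := [0, 47, 94, 113, 49, 30, 111, 64, 98, 77, 60, 19, 83, 124, 13, 34, 73, 102, 23, 56, 120, 87, 38, 9, 43, 4, 117, 90, 26, 53, 68, 107, 31, 48, 65, 110, 46, 1, 112, 95, 125, 82, 35, 12, 76, 99, 18, 61, 86, 121, 8, 39, 103, 72, 57, 22, 52, 27, 106, 69, 5, 42, 91, 116, 62, 17, 96, 79, 15, 32, 81, 126, 92, 115, 2, 45, 109, 66, 51, 28, 119, 88, 41, 6, 70, 105, 24, 55, 21, 58, 75, 100, 36, 11, 122, 85, 33, 14, 127, 80, 16, 63, 78, 97, 67, 108, 29, 50, 114, 93, 44, 3, 104, 71, 54, 25, 89, 118, 7, 40, 10, 37, 84, 123, 59, 20, 101, 74, 124, 83, 34, 13, 77, 98, 19, 60, 30, 49, 64, 111, 47, 0, 113, 94, 53, 26, 107, 68, 4, 43, 90, 117, 87, 120, 9, 38, 102, 73, 56, 23, 99, 76, 61, 18, 82, 125, 12, 35, 1, 46, 95, 112, 48, 31, 110, 65, 42, 5, 116, 91, 27, 52, 69, 106, 72, 103, 22, 57, 121, 86, 39, 8, 66, 109, 28, 51,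 115, 92, 45, 2, 32, 15, 126, 81, 17, 62, 79, 96, 11, 36, 85, 122, 58, 21, 100, 75, 105, 70, 55, 24, 88, 119, 6, 41, 93, 114, 3, 44, 108, 67, 50, 29, 63, 16, 97, 78, 14, 33, 80, 127, 20, 59, 74, 101, 37, 10, 123, 84, 118, 89, 40, 7, 71, 104, 25, 54]
def pvNT2 : List Nat := [0, 13, 26, 23, 52, 57, 46, 35, 104, 101, 114, 127, 92, 81, 70, 75, 93, 80, 71, 74, 105, 100, 115, 126, 53, 56, 47, 34, 1, 12, 27, 22, 55, 58, 45, 32, 3, 14, 25, 20, 95, 82, 69, 72, 107, 102, 113, 124, 106, 103, 112, 125, 94, 83, 68, 73, 2, 15, 24, 21, 54, 59, 44, 33, 110, 99, 116, 121, 90, 87, 64, 77, 6, 11, 28, 17, 50, 63, 40, 37, 51, 62, 41, 36, 7, 10, 29, 16, 91, 86, 65, 76, 111, 98, 117, 120, 89, 84, 67, 78, 109, 96, 119, 122, 49, 60, 43, 38, 5, 8, 31, 18, 4, 9, 30, 19, 48, 61, 42, 39, 108, 97, 118, 123, 88, 85, 66, 79, 81, 92, 75, 70, 101, 104, 127, 114,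 57, 52, 35, 46, 13, 0, 23, 26, 12, 1, 22, 27, 56, 53, 34, 47, 100, 105, 126, 115, 80, 93, 74, 71, 102, 107, 124, 113, 82, 95, 72, 69, 14, 3, 20, 25, 58, 55, 32, 45, 59, 54, 33, 44, 15, 2, 21, 24, 83, 94, 73, 68, 103, 106, 125, 112, 63, 50, 37, 40, 11, 6, 17, 28, 87, 90, 77, 64, 99, 110, 121, 116, 98, 111, 120, 117, 86, 91, 76, 65, 10, 7, 16, 29, 62, 51, 36, 41, 8, 5, 18, 31, 60, 49, 38, 43, 96, 109, 122, 119, 84, 89, 78, 67, 85, 88, 79, 66, 97, 108, 123, 118, 61, 48, 39, 42, 9, 4, 19, 30]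

theorem band_mask (a : Int) : PySem.Int.band a 16777215 = a % 16777216 := by
  unfold PySem.Int.band
  have h1 : a.toNat &&& 16777215 = a.toNat % 16777216 := by
    simpa using Nat.and_two_pow_sub_one_eq_mod a.toNat 24
  have h2 : (-a-1).toNat &&& 16777215 = (-a-1).toNat % 16777216 := by
    simpa using Nat.and_two_pow_sub_one_eq_mod (-a-1).toNat 24
  split_ifs with ha hb hb
  · rw [show (Int.toNat 16777215) = 16777215 from rfl, h1]; omega
  · norm_num at hb
  · rw [show (Int.toNat 16777215) = 16777215 from rfl, Nat.and_comm, h2]; omega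
  · norm_num at hb

theorem intbit (a : Int) (i : Nat) (h : i < 24) :
    (a / 2^i) % 2 = ((a % 16777216) / 2^i) % 2 := by
  interval_cases i <;> norm_num <;> omega

theorem bit_byte (n s j : Nat) (hj : j < 8) :
    (n >>> (s + j)) &&& 1 = (((n >>> s) &&& 255) >>> j) &&& 1 := by
  have h255 : ∀ m : Nat, m &&& 255 = m % 256 := fun m => by
    simpa using Nat.and_two_pow_sub_one_eq_mod m 8
  rw [Nat.shiftRight_eq_div_pow, Nat.and_one_is_mod, h255, Nat.shiftRight_eq_div_pow,
      Nat.shiftRight_eq_div_pow, Nat.and_one_is_mod, pow_add, ← Nat.div_div_eq_div_mul]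
  generalize n / 2 ^ s = m
  interval_cases j <;> omega

set_option maxRecDepth 1000000 in
set_option maxHeartbeats 12000000 in
theorem L_split : ∀ l < 128, ∀ b < 256, pvRun8 l b = pvRun8 l 0 ^^^ pvRun8 0 b := by decide

set_option maxRecDepth 1000000 in
set_option maxHeartbeats 12000000 in
theorem L_lin0 : ∀ x < 128, ∀ y < 128, pvRun8 (x ^^^ y) 0 = pvRun8 x 0 ^^^ pvRun8 y 0 := by decide

set_option maxRecDepth 100000 in
theorem L_b0 : ∀ b < 256, pvRun8 0 b = pvNT2.getD b 0 := by decide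

set_option maxRecDepth 100000 in
theorem L_b1 : ∀ b < 256, pvRun8 (pvNT2.getD b 0) 0 = pvNT1.getD b 0 := by decide

set_option maxRecDepth 100000 in
theorem L_b2 : ∀ b < 256, pvRun8 (pvNT1.getD b 0) 0 = pvNT0.getD b 0 := by decide

set_option maxRecDepth 100000 in
theorem L_bnd2 : ∀ b < 256, pvNT2.getD b 0 < 128 := by decide

set_option maxRecDepth 100000 in
theorem L_bnd1 : ∀ b < 256, pvNT1.getD b 0 < 128 := by decide

set_option maxRecDepth 100000 in
theorem L_bndr : ∀ l < 128, pvRun8 l 0 < 128 := by decide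

set_option maxRecDepth 100000 in
theorem castT0 : ∀ i < 256, PySem.List.pyGetD pvT0 (i : Nat) 0 = ((pvNT0.getD i 0 : Nat) : Int) := by decide
set_option maxRecDepth 100000 in
theorem castT1 : ∀ i < 256, PySem.List.pyGetD pvT1 (i : Nat) 0 = ((pvNT1.getD i 0 : Nat) : Int) := by decide
set_option maxRecDepth 100000 in
theorem castT2 : ∀ i < 256, PySem.List.pyGetD pvT2 (i : Nat) 0 = ((pvNT2.getD i 0 : Nat) : Int) := by decide

theorem core (c0 c1 c2 : Nat) (h0 : c0 < 256) (h1 : c1 < 256) (h2 : c2 < 256) :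
    pvRun8 (pvRun8 (pvRun8 0 c0) c1) c2 =
      (pvNT0.getD c0 0 ^^^ pvNT1.getD c1 0) ^^^ pvNT2.getD c2 0 := by
  have b2 := L_bnd2 c0 h0
  have r0 : pvRun8 0 c0 = pvNT2.getD c0 0 := L_b0 c0 h0
  have s1 : pvRun8 (pvRun8 0 c0) c1 = pvNT1.getD c0 0 ^^^ pvNT2.getD c1 0 := by
    rw [r0, L_split _ (L_bnd2 c0 h0) _ h1, L_b1 c0 h0, L_b0 c1 h1]
  have hx : pvNT1.getD c0 0 ^^^ pvNT2.getD c1 0 < 128 := by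
    have := Nat.xor_lt_two_pow (n := 7) (L_bnd1 c0 h0) (L_bnd2 c1 h1)
    simpa using this
  rw [s1, L_split _ hx _ h2, L_lin0 _ (L_bnd1 c0 h0) _ (L_bnd2 c1 h1),
      L_b2 c0 h0, L_b1 c1 h1, L_b0 c2 h2]


-- ===== VERDICT (by name: the statement is the Claim_ definition above) =====
set_option maxHeartbeats 2000000 in
theorem calculate_bch_ecc_spec : Claim_equal_calculate_bch_ecc := by
  intro hb0 hb1 hb2 _
  unfold Spec_calculate_bch_ecc
  set e := PySem.Int.bor (PySem.Int.bor (hb0 <<< 16) (hb1 <<< 8)) hb2 with he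
  have hms : (0:Int) ≤ e % 16777216 := Int.emod_nonneg _ (by norm_num)
  set n : Nat := (e % 16777216).toNat with hn
  have hcast : ((n:Nat) : Int) = e % 16777216 := Int.toNat_of_nonneg hms
  have hmask : PySem.Int.band e 16777215 = ((n:Nat) : Int) := by rw [band_mask, hcast]
  -- bit extraction: bit i of e equals bit i of its low 24 bits n, for i < 24
  have hbit : ∀ i : Nat, i < 24 → PySem.Int.band (e >>> i) 1 = (((n >>> i) &&& 1 : Nat) : Int) := by
    intro i hi
    rw [PySem.Int.band_one]
    unfold PySem.Int.mod
    rw [Int.fmod_eq_emod, Int.shiftRight_eq_div_pow]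
    rw [Nat.shiftRight_eq_div_pow, Nat.and_one_is_mod]
    have h1 : (e / ((2^i : Nat) : Int)) % 2 = ((e % 16777216) / 2^i) % 2 := by
      have := intbit e i hi; push_cast at this ⊢; convert this using 3
    rw [h1, ← hcast]
    push_cast
    rfl
  -- one loop step, transported to Nat
  have step_one : ∀ (l j : Nat), j < 24 →
      pvLoopBody e ((l:Nat):Int) ((j:Nat):Int) = ((pvStep l ((n >>> j) &&& 1) : Nat) : Int) := by
    intro l j hj
    have hsr : (((l:Nat):Int) >>> (6:Nat)) = ((l >>> 6 : Nat) : Int) := by exact_mod_cast rfl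
    have hsl : (((l:Nat):Int) <<< (1:Nat)) = ((l <<< 1 : Nat) : Int) := by exact_mod_cast rfl
    have hb1 : ∀ m : Nat, PySem.Int.band ((m:Nat):Int) 1 = ((m &&& 1 : Nat) : Int) := by
      intro m; exact_mod_cast PySem.Int.band_natCast m 1
    have hb127 : ∀ m : Nat,
        PySem.Int.band ((m:Nat):Int) (((1 <<< 7 : Nat) : Int) - 1) = ((m &&& 127 : Nat) : Int) := by
      intro m
      rw [show ((1 <<< 7 : Nat) : Int) - 1 = ((127:Nat):Int) from by decide]
      exact_mod_cast PySem.Int.band_natCast m 127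
    have hx13 : ∀ m : Nat, PySem.Int.bxor ((m:Nat):Int) 13 = ((m ^^^ 13 : Nat) : Int) := by
      intro m; exact_mod_cast PySem.Int.bxor_natCast m 13
    unfold pvLoopBody pvStep
    simp only [Int.toNat_natCast, hbit j hj, hsr, hsl, hb1, hb127, hx13,
      PySem.Int.bxor_natCast, Nat.cast_ne_zero]
    split_ifs <;> rfl
  -- the whole loop, transported to Nat
  have key : ∀ (js : List Nat), (∀ j ∈ js, j < 24) → ∀ l : Nat,
      (js.map (fun j => ((j:Nat):Int))).foldl (pvLoopBody e) ((l:Nat):Int)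
        = ((js.foldl (fun a j => pvStep a ((n >>> j) &&& 1)) l : Nat) : Int) := by
    intro js
    induction js with
    | nil => intro _ l; rfl
    | cons j js ih =>
      intro hball l
      rw [List.map_cons, List.foldl_cons, List.foldl_cons,
        step_one l j (hball j (List.mem_cons_self))]
      exact ih (fun x hx => hball x (List.mem_cons_of_mem _ hx)) _
  -- byte decomposition of n
  set c0 := (n >>> 16) &&& 255 with hc0
  set c1 := (n >>> 8) &&& 255 with hc1
  set c2 := n &&& 255 with hc2
  have hlt0 : c0 < 256 := Nat.lt_succ_of_le Nat.and_le_right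
  have hlt1 : c1 < 256 := Nat.lt_succ_of_le Nat.and_le_right
  have hlt2 : c2 < 256 := Nat.lt_succ_of_le Nat.and_le_right
  have hrange : PySem.List.pyRange 23 (-1) (-1)
      = ([23,22,21,20,19,18,17,16,15,14,13,12,11,10,9,8,7,6,5,4,3,2,1,0] : List Nat).map
          (fun j => ((j:Nat):Int)) := by decide
  have hchain : ([23,22,21,20,19,18,17,16,15,14,13,12,11,10,9,8,7,6,5,4,3,2,1,0] : List Nat).foldl
        (fun a j => pvStep a ((n >>> j) &&& 1)) 0
      = pvRun8 (pvRun8 (pvRun8 0 c0) c1) c2 := by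
    simp only [List.foldl]
    unfold pvRun8
    rw [show ((n >>> 23) &&& 1) = ((c0 >>> 7) &&& 1) by
          rw [hc0]; simpa using bit_byte n 16 7 (by norm_num),
        show ((n >>> 22) &&& 1) = ((c0 >>> 6) &&& 1) by
          rw [hc0]; simpa using bit_byte n 16 6 (by norm_num),
        show ((n >>> 21) &&& 1) = ((c0 >>> 5) &&& 1) by
          rw [hc0]; simpa using bit_byte n 16 5 (by norm_num),
        show ((n >>> 20) &&& 1) = ((c0 >>> 4) &&& 1) by
          rw [hc0]; simpa using bit_byte n 16 4 (by norm_num),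
        show ((n >>> 19) &&& 1) = ((c0 >>> 3) &&& 1) by
          rw [hc0]; simpa using bit_byte n 16 3 (by norm_num),
        show ((n >>> 18) &&& 1) = ((c0 >>> 2) &&& 1) by
          rw [hc0]; simpa using bit_byte n 16 2 (by norm_num),
        show ((n >>> 17) &&& 1) = ((c0 >>> 1) &&& 1) by
          rw [hc0]; simpa using bit_byte n 16 1 (by norm_num),
        show ((n >>> 16) &&& 1) = (c0 &&& 1) by
          rw [hc0]; simpa using bit_byte n 16 0 (by norm_num),
        show ((n >>> 15) &&& 1) = ((c1 >>> 7) &&& 1) by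
          rw [hc1]; simpa using bit_byte n 8 7 (by norm_num),
        show ((n >>> 14) &&& 1) = ((c1 >>> 6) &&& 1) by
          rw [hc1]; simpa using bit_byte n 8 6 (by norm_num),
        show ((n >>> 13) &&& 1) = ((c1 >>> 5) &&& 1) by
          rw [hc1]; simpa using bit_byte n 8 5 (by norm_num),
        show ((n >>> 12) &&& 1) = ((c1 >>> 4) &&& 1) by
          rw [hc1]; simpa using bit_byte n 8 4 (by norm_num),
        show ((n >>> 11) &&& 1) = ((c1 >>> 3) &&& 1) by
          rw [hc1]; simpa using bit_byte n 8 3 (by norm_num),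
        show ((n >>> 10) &&& 1) = ((c1 >>> 2) &&& 1) by
          rw [hc1]; simpa using bit_byte n 8 2 (by norm_num),
        show ((n >>> 9) &&& 1) = ((c1 >>> 1) &&& 1) by
          rw [hc1]; simpa using bit_byte n 8 1 (by norm_num),
        show ((n >>> 8) &&& 1) = (c1 &&& 1) by
          rw [hc1]; simpa using bit_byte n 8 0 (by norm_num),
        show ((n >>> 7) &&& 1) = ((c2 >>> 7) &&& 1) by
          rw [hc2]; simpa using bit_byte n 0 7 (by norm_num),
        show ((n >>> 6) &&& 1) = ((c2 >>> 6) &&& 1) by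
          rw [hc2]; simpa using bit_byte n 0 6 (by norm_num),
        show ((n >>> 5) &&& 1) = ((c2 >>> 5) &&& 1) by
          rw [hc2]; simpa using bit_byte n 0 5 (by norm_num),
        show ((n >>> 4) &&& 1) = ((c2 >>> 4) &&& 1) by
          rw [hc2]; simpa using bit_byte n 0 4 (by norm_num),
        show ((n >>> 3) &&& 1) = ((c2 >>> 3) &&& 1) by
          rw [hc2]; simpa using bit_byte n 0 3 (by norm_num),
        show ((n >>> 2) &&& 1) = ((c2 >>> 2) &&& 1) by
          rw [hc2]; simpa using bit_byte n 0 2 (by norm_num),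
        show ((n >>> 1) &&& 1) = ((c2 >>> 1) &&& 1) by
          rw [hc2]; simpa using bit_byte n 0 1 (by norm_num),
        show ((n >>> 0) &&& 1) = (c2 &&& 1) by
          rw [hc2]; simpa using bit_byte n 0 0 (by norm_num)]
  -- bounds on the running LFSR value
  have hXlt : pvRun8 (pvRun8 0 c0) c1 < 128 := by
    rw [L_b0 c0 hlt0, L_split _ (L_bnd2 c0 hlt0) _ hlt1]
    have := Nat.xor_lt_two_pow (n := 7) (L_bndr _ (L_bnd2 c0 hlt0)) (L_bnd2 c1 hlt1)
    simpa [L_b0 c1 hlt1] using this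
  have hRlt : pvRun8 (pvRun8 (pvRun8 0 c0) c1) c2 < 128 := by
    rw [L_split _ hXlt _ hlt2]
    have := Nat.xor_lt_two_pow (n := 7) (L_bndr _ hXlt) (L_bnd2 c2 hlt2)
    simpa [L_b0 c2 hlt2] using this
  -- A's value
  have hkey0 := key [23,22,21,20,19,18,17,16,15,14,13,12,11,10,9,8,7,6,5,4,3,2,1,0] (by decide) 0
  rw [Nat.cast_zero] at hkey0
  have hA : calculate_bch_ecc hb0 hb1 hb2
      = ((pvRun8 (pvRun8 (pvRun8 0 c0) c1) c2 : Nat) : Int) := by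
    have h0 : calculate_bch_ecc hb0 hb1 hb2
        = PySem.Int.band ((PySem.List.pyRange 23 (-1) (-1)).foldl (pvLoopBody e) 0) 0x7F := rfl
    rw [h0, hrange, hkey0, hchain,
      show (0x7F:Int) = ((127:Nat):Int) from rfl, PySem.Int.band_natCast]
    congr 1
    have h127 : pvRun8 (pvRun8 (pvRun8 0 c0) c1) c2 &&& 127
        = pvRun8 (pvRun8 (pvRun8 0 c0) c1) c2 % 128 := by
      simpa using Nat.and_two_pow_sub_one_eq_mod (pvRun8 (pvRun8 (pvRun8 0 c0) c1) c2) 7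
    rw [h127, Nat.mod_eq_of_lt hRlt]
  -- B's value
  have hB : calculate_bch_ecc_alt hb0 hb1 hb2
      = (((pvNT0.getD c0 0 ^^^ pvNT1.getD c1 0) ^^^ pvNT2.getD c2 0 : Nat) : Int) := by
    have h16 : (((n:Nat):Int) >>> (16:Nat)) = ((n >>> 16 : Nat) : Int) := by exact_mod_cast rfl
    have h8 : (((n:Nat):Int) >>> (8:Nat)) = ((n >>> 8 : Nat) : Int) := by exact_mod_cast rfl
    have hbm : ∀ m : Nat, PySem.Int.band ((m:Nat):Int) 0xFF = ((m &&& 255 : Nat) : Int) := by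
      intro m; exact_mod_cast PySem.Int.band_natCast m 255
    have h0 : calculate_bch_ecc_alt hb0 hb1 hb2
        = PySem.Int.bxor
            (PySem.Int.bxor
              (PySem.List.pyGetD pvT0
                (PySem.Int.band ((PySem.Int.band e 0xFFFFFF) >>> (16:Nat)) 0xFF) 0)
              (PySem.List.pyGetD pvT1
                (PySem.Int.band ((PySem.Int.band e 0xFFFFFF) >>> (8:Nat)) 0xFF) 0))
            (PySem.List.pyGetD pvT2 (PySem.Int.band (PySem.Int.band e 0xFFFFFF) 0xFF) 0) := rfl
    rw [h0, show (0xFFFFFF:Int) = 16777215 from rfl, hmask, h16, h8, hbm, hbm, hbm,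
      castT0 c0 hlt0, castT1 c1 hlt1, castT2 c2 hlt2,
      PySem.Int.bxor_natCast, PySem.Int.bxor_natCast]
  rw [hA, hB]
  exact_mod_cast core c0 c1 c2 hlt0 hlt1 hlt2
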